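-- pv_equiv track=rewrite | github.com/Alessandro201/BlastUI | src/pages/2 Blast Query.py | duplicated_sequences
-- ===== SOURCE A (Python) =====
-- from collections import defaultdict
--
-- def duplicated_sequences(query: str) -> dict | None:
--     """
--     This function checks if the query has duplicated sequences.
--
--     :param query: the query to be checked
--     :return: The duplicated headers, None otherwise
--     """
--
--     seqs = defaultdict(list)
--
--     queries = query.strip().split('>')
--
--     for query in queries:
--         # Blank lines
--         if len(query) == 0:
--             continue
--
--         header, seq = query.split('\n', maxsplit=1)
--
--         # Remove new lines to avoid missing identical sequences with different new lines in the middle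
--         seq = seq.replace('\n', '')
--
--         seqs[seq].append(header)
--
--     dup_seqs = {seq: headers for seq, headers in seqs.items() if len(headers) > 1}
--
--     return dup_seqs if dup_seqs else None
-- ===== SOURCE B (Python) =====
-- def duplicated_sequences(query: str) -> dict | None:
--     # Declarative pipeline, no incremental grouping structure: parse the records,
--     # then for each distinct sequence (first-occurrence order) that occurs more
--     # than once, gather its headers by a direct scan over the parsed records.
--     chunks = [c for c in query.strip().split('>') if c]
--     records = [c.split('\n', 1) for c in chunks]
--     pairs = [(s.replace('\n', ''), h) for h, s in records]
--     seqs = [s for s, _ in pairs]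
--     dup = {s: [h for t, h in pairs if t == s]
--            for s in dict.fromkeys(seqs) if seqs.count(s) > 1}
--     return dup or None
-- ===== Notes on version B (the rewrite author's own statement) =====
-- stated objective: simpler
-- what changed: B drops the incremental defaultdict grouping entirely: it parses to a flat (seq, header) list, takes the distinct sequences in first-occurrence order (dict.fromkeys), and for each sequence whose count exceeds 1 gathers its headers by a direct scan over the pair list - a nested-scan dict comprehension instead of a single-pass hash-grouping loop.
import Mathlib
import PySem

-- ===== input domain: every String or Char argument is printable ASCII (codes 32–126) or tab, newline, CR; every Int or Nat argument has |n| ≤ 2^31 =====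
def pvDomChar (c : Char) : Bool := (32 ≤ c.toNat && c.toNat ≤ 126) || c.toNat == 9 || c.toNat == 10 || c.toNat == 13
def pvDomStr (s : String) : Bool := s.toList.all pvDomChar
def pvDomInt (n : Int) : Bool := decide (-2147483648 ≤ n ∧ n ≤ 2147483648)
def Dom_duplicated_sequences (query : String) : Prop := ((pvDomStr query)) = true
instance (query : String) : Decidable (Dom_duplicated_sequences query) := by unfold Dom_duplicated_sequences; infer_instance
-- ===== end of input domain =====

-- B's change: instead of grouping every header under its sequence in a defaultdict as it goes
-- and then filtering the finished groups (A), B is a declarative pipeline with no grouping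
-- structure at all: distinct sequences in first-occurrence order, keep those counted more than
-- once, and gather each one's headers by a direct scan over the parsed (seq, header) pairs.

-- ===== PORT A =====
def duplicated_sequences (query : String) : Option (List (String × List String)) :=
  -- queries = query.strip().split('>')   (sep ">" is nonempty, split? is always `some`)
  let queries := (PySem.Str.split? (PySem.Str.strip query) ">").getD []
  -- for query in queries: … seqs[seq].append(header)   (defaultdict(list))
  let seqs := queries.foldl (fun (d : PySem.Dict String (List String)) q =>
      if PySem.Str.len q == 0 then d
      else
        match PySem.Str.splitMax? q "\n" 1 with
        | some (header :: seq :: _) =>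
            d.modify (PySem.Str.replace seq "\n" "") [] (· ++ [header])
        | _ => d)   -- only reachable when q has no '\n': Python raises ValueError, excluded by Pre_
    PySem.Dict.empty
  let dup_seqs := seqs.items.filter (fun p => PySem.List.len p.2 > 1)
  if dup_seqs.isEmpty then none else some dup_seqs

-- ===== PORT B =====
def duplicated_sequences_alt (query : String) : Option (List (String × List String)) :=
  -- chunks/records/pairs comprehensions, fused: the unpack `h, s = c.split('\n', 1)`
  -- raises ValueError when the chunk has no '\n' (excluded by Pre_; `none` = skip there)
  let pairs := ((PySem.Str.split? (PySem.Str.strip query) ">").getD []).filterMap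
      (fun c =>
        if PySem.Str.len c == 0 then none
        else
          let parts := (PySem.Str.splitMax? c "\n" 1).getD []
          if 2 ≤ parts.length then
            some (PySem.Str.replace (parts.getD 1 "") "\n" "", parts.getD 0 "")
          else none)
  let seqs := pairs.map Prod.fst
  -- {s: [h for t, h in pairs if t == s] for s in dict.fromkeys(seqs) if seqs.count(s) > 1}
  -- dict.fromkeys(seqs) = distinct sequences in first-occurrence order (PySem.Set.ofList);
  -- the keys are distinct, so the dict's items are exactly this filtered map, in key order.
  let dup := ((PySem.Set.ofList seqs).filter
      (fun s => PySem.List.count seqs s > 1)).map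
      (fun s => (s, (pairs.filter (fun p => p.1 == s)).map Prod.snd))
  if dup.isEmpty then none else some dup

-- ===== PRECONDITION & SPEC =====
-- Pre_ excludes exactly the inputs where both Pythons raise ValueError: a nonempty record chunk
-- (between the FASTA '>' separators) with no newline in it (a header with no sequence line).
def Pre_duplicated_sequences (query : String) : Prop :=
  ∀ c ∈ (PySem.Str.split? (PySem.Str.strip query) ">").getD [],
    c ≠ "" → PySem.Str.isIn "\n" c = true
instance (query : String) : Decidable (Pre_duplicated_sequences query) := by
  unfold Pre_duplicated_sequences; infer_instance

def pvWitness_duplicated_sequences : String := ">h1\nACGT\n>h2\nAC\nGT\n>h3\nTT\n"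

def Spec_duplicated_sequences (query : String) (out : Option (List (String × List String))) : Prop :=
  out = duplicated_sequences_alt query
instance (query : String) (out : Option (List (String × List String))) :
    Decidable (Spec_duplicated_sequences query out) := by unfold Spec_duplicated_sequences; infer_instance

-- ===== CLAIM (what is proved, stated in full; the proofs are below) =====
def Claim_equal_duplicated_sequences : Prop :=
  ∀ (query : String), Dom_duplicated_sequences query → Pre_duplicated_sequences query →
    Spec_duplicated_sequences query (duplicated_sequences query)

-- ===== LEMMAS AND PROOFS =====

-- the per-chunk parser shared by both characterisations
def pvParse? (c : String) : Option (String × String) :=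
  if PySem.Str.len c == 0 then none
  else
    match PySem.Str.splitMax? c "\n" 1 with
    | some (h :: s :: _) => some (PySem.Str.replace s "\n" "", h)
    | _ => none

-- A's loop body, expressed through the shared parser
theorem astep_eq (d : PySem.Dict String (List String)) (q : String) :
    (if PySem.Str.len q == 0 then d
     else
       match PySem.Str.splitMax? q "\n" 1 with
       | some (header :: seq :: _) =>
           d.modify (PySem.Str.replace seq "\n" "") [] (· ++ [header])
       | _ => d)
    = (match pvParse? q with
       | some p => d.modify p.1 [] (· ++ [p.2])
       | none => d) := by
  unfold pvParse?
  split
  · rfl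
  · rcases hsp : PySem.Str.splitMax? q "\n" 1 with _ | (_ | ⟨h, _ | ⟨s, t⟩⟩) <;> rfl

-- A's grouping fold over the chunks is the grouping fold over the parsed pairs
theorem afold_eq_pairs_fold (qs : List String) (d : PySem.Dict String (List String)) :
    qs.foldl (fun (d : PySem.Dict String (List String)) q =>
        if PySem.Str.len q == 0 then d
        else
          match PySem.Str.splitMax? q "\n" 1 with
          | some (header :: seq :: _) =>
              d.modify (PySem.Str.replace seq "\n" "") [] (· ++ [header])
          | _ => d) d
      = (qs.filterMap pvParse?).foldl (fun d p => d.modify p.1 [] (· ++ [p.2])) d := by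
  induction qs generalizing d with
  | nil => rfl
  | cons q qs ih =>
    rw [List.foldl_cons, astep_eq, List.filterMap_cons]
    cases hp : pvParse? q <;> simp only [List.foldl_cons] <;> rw [ih]

-- items of the grouping fold: one entry per distinct key (first-occurrence order),
-- whose value is the scan B performs
theorem items_group_fold (l : List (String × String)) :
    (l.foldl (fun (d : PySem.Dict String (List String)) p =>
      d.modify p.1 [] (· ++ [p.2])) PySem.Dict.empty).items
    = (PySem.Set.ofList (l.map Prod.fst)).map
        (fun k => (k, (l.filter (fun p => p.1 == k)).map Prod.snd)) := by
  have hnd : (l.foldl (fun (d : PySem.Dict String (List String)) p =>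
      d.modify p.1 [] (· ++ [p.2])) PySem.Dict.empty).keys.Nodup :=
    PySem.Dict.nodup_keys_foldl_modify_key l Prod.fst [] (fun _ p => (· ++ [p.2]))
      PySem.Dict.empty (by simp)
  have hkeys : (l.foldl (fun (d : PySem.Dict String (List String)) p =>
      d.modify p.1 [] (· ++ [p.2])) PySem.Dict.empty).keys
      = PySem.Set.ofList (l.map Prod.fst) :=
    PySem.Dict.keys_foldl_modify_key l Prod.fst [] (fun _ p => (· ++ [p.2])) PySem.Dict.empty
  rw [PySem.Dict.items_eq_map_keys _ hnd [], hkeys]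
  exact List.map_congr_left (fun k _ => by
    rw [PySem.Dict.getD_foldl_modify_append l PySem.Dict.empty k]; rfl)

-- ===== VERDICT (by name: the statement is the Claim_ definition above) =====
set_option maxHeartbeats 1000000 in
theorem duplicated_sequences_spec : Claim_equal_duplicated_sequences := by
  intro query _ _
  show duplicated_sequences query = duplicated_sequences_alt query
  simp only [duplicated_sequences, duplicated_sequences_alt]
  rw [afold_eq_pairs_fold, items_group_fold]
  have hBpairs : ∀ qs : List String, List.filterMap
      (fun c =>
        if PySem.Str.len c == 0 then none
        else
          let parts := (PySem.Str.splitMax? c "\n" 1).getD []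
          if 2 ≤ parts.length then
            some (PySem.Str.replace (parts.getD 1 "") "\n" "", parts.getD 0 "")
          else none) qs = List.filterMap pvParse? qs := by
    intro qs
    apply List.filterMap_congr
    intro c _
    unfold pvParse?
    split
    · rfl
    · rcases hsp : PySem.Str.splitMax? c "\n" 1 with _ | (_ | ⟨h, _ | ⟨sq, t⟩⟩) <;>
        simp [hsp]
  rw [hBpairs]
  set pairs := ((PySem.Str.split? (PySem.Str.strip query) ">").getD []).filterMap pvParse?
    with hpairs
  have hmain : List.filter (fun p => decide (PySem.List.len p.2 > 1))
      (List.map (fun k => (k, (pairs.filter (fun p => p.1 == k)).map Prod.snd))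
        (PySem.Set.ofList (pairs.map Prod.fst)))
      = List.map (fun k => (k, (pairs.filter (fun p => p.1 == k)).map Prod.snd))
          (List.filter (fun s => decide (PySem.List.count (pairs.map Prod.fst) s > 1))
            (PySem.Set.ofList (pairs.map Prod.fst))) := by
    rw [List.filter_map]
    refine congrArg _ (List.filter_congr ?_)
    intro k _
    have hlen : ((pairs.filter (fun p => p.1 == k)).map Prod.snd).length
        = (pairs.map Prod.fst).count k := by
      rw [List.length_map, ← List.countP_eq_length_filter, List.count_eq_countP, List.countP_map]
      rfl
    simp only [Function.comp, PySem.List.len_eq, PySem.List.count_eq, hlen]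
    rw [decide_eq_decide]
    omega
  rw [hmain]
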